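-- pv_equiv track=rewrite | github.com/VPhoenix17/AI-interviewer | Admin/extractData.py | convert_pseudo_json_to_json
-- ===== SOURCE A (Python) =====
-- def convert_pseudo_json_to_json(pseudo_json_string):
--     json_data = {}
--     key_value_pairs = pseudo_json_string.split('\n')
--     key = None
--     for line in key_value_pairs:
--         if ':' in line:
--             key, value = line.split(':', 1)
--             json_data[key] = value.strip()
--         elif key is not None:
--             json_data[key] += '\n' + line.strip()
--     return json_data
-- ===== SOURCE B (Python) =====
-- def convert_pseudo_json_to_json(pseudo_json_string):
--     # Phase 1: group lines — a ':' line starts a group, other lines extend the last group.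
--     groups = []
--     for line in pseudo_json_string.split('\n'):
--         if ':' in line:
--             k, v = line.split(':', 1)
--             groups.append((k, [v.strip()]))
--         elif groups:
--             groups[-1][1].append(line.strip())
--     # Phase 2: one join per group; later duplicate keys overwrite in order.
--     result = {}
--     for k, parts in groups:
--         result[k] = '\n'.join(parts)
--     return result
-- ===== Notes on version B (the rewrite author's own statement) =====
-- stated objective: alternative
-- what changed: Replaces A's single loop that accumulates continuation lines by repeated in-place string concatenation into the dict with a two-phase decomposition: first group the lines (a line containing a colon opens a group with its unstripped key and stripped value, other lines append their stripped text to the last group's list), then build the dict with one newline-join per group, duplicate keys overwriting in order.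
import Mathlib
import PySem

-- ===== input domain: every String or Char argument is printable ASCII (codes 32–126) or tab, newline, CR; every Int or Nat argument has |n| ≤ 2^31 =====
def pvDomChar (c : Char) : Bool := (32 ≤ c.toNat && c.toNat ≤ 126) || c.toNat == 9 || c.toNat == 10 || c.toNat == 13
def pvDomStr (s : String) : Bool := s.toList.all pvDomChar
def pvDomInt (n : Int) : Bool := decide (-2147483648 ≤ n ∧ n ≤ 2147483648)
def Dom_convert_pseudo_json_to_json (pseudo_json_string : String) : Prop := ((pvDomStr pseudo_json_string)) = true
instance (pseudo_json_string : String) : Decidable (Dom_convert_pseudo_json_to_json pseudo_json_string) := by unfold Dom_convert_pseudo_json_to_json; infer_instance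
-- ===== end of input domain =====

-- B replaces A's per-line string '+=' accumulation by a two-phase group-then-join decomposition (alternative structure, same result).


-- ===== PORT A =====
-- one iteration of A's loop body; state = (json_data, key)
def pvStepA (st : PySem.Dict String String × Option String) (line : String) :
    PySem.Dict String String × Option String :=
  if PySem.Str.isIn ":" line then
    match PySem.Str.splitMax? line ":" 1 with
    | some (k :: v :: _) => (st.1.insert k (PySem.Str.strip v), some k)
    | _ => st  -- unreachable: sep ≠ "" gives some, and ':' in line gives ≥ 2 parts
  else
    match st.2 with
    | some k =>
      match st.1.get? k with
      | some v => (st.1.insert k (v ++ "\n" ++ PySem.Str.strip line), st.2)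
      | none => st  -- unreachable: json_data[key] was set when key was
    | none => st

def convert_pseudo_json_to_json (pseudo_json_string : String) : List (String × String) :=
  let key_value_pairs := (PySem.Str.split? pseudo_json_string "\n").getD []
  (key_value_pairs.foldl pvStepA (PySem.Dict.empty, none)).1.items

-- ===== PORT B =====
-- phase 1: one iteration of the grouping loop
def pvStepB (gs : List (String × List String)) (line : String) : List (String × List String) :=
  if PySem.Str.isIn ":" line then
    match PySem.Str.splitMax? line ":" 1 with
    | some (k :: v :: _) => gs ++ [(k, [PySem.Str.strip v])]
    | _ => gs  -- unreachable, as in A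
  else
    match gs.getLast? with
    | some g => gs.dropLast ++ [(g.1, g.2 ++ [PySem.Str.strip line])]  -- groups[-1][1].append(...)
    | none => gs

-- phase 2: result[k] = '\n'.join(parts) per group, in order
def pvBuild (gs : List (String × List String)) : PySem.Dict String String :=
  gs.foldl (fun d p => d.insert p.1 (PySem.Str.join "\n" p.2)) PySem.Dict.empty

def convert_pseudo_json_to_json_alt (pseudo_json_string : String) : List (String × String) :=
  let lines := (PySem.Str.split? pseudo_json_string "\n").getD []
  let groups := lines.foldl pvStepB []
  (pvBuild groups).items

-- ===== PRECONDITION & SPEC =====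
def Spec_convert_pseudo_json_to_json (pseudo_json_string : String) (out : List (String × String)) : Prop := out = convert_pseudo_json_to_json_alt pseudo_json_string
instance (pseudo_json_string : String) (out : List (String × String)) : Decidable (Spec_convert_pseudo_json_to_json pseudo_json_string out) := by unfold Spec_convert_pseudo_json_to_json; infer_instance

-- ===== CLAIM (what is proved, stated in full; the proofs are below) =====
def Claim_equal_convert_pseudo_json_to_json : Prop := ∀ (pseudo_json_string : String), Dom_convert_pseudo_json_to_json pseudo_json_string → Spec_convert_pseudo_json_to_json pseudo_json_string (convert_pseudo_json_to_json pseudo_json_string)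

-- ===== LEMMAS AND PROOFS =====

theorem pvCharsJoin_append_singleton (sep : List Char) (ps : List (List Char)) (x : List Char)
    (h : ps ≠ []) :
    PySem.Chars.join sep (ps ++ [x]) = PySem.Chars.join sep ps ++ sep ++ x := by
  induction ps with
  | nil => exact absurd rfl h
  | cons a ps ih =>
    cases ps with
    | nil =>
      simp [PySem.Chars.join_cons_cons, PySem.Chars.join_singleton]
    | cons b ps =>
      simp only [List.cons_append] at ih ⊢
      rw [PySem.Chars.join_cons_cons, ih (by simp), PySem.Chars.join_cons_cons]
      simp [List.append_assoc]

theorem pvJoin_append_singleton (ps : List String) (x : String) (h : ps ≠ []) :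
    PySem.Str.join "\n" (ps ++ [x]) = PySem.Str.join "\n" ps ++ "\n" ++ x := by
  rw [← String.toList_inj]
  simp only [PySem.Str.toList_join, List.map_append, List.map_cons, List.map_nil,
    String.toList_append]
  exact pvCharsJoin_append_singleton _ _ _ (by simpa using h)

theorem pvJoin_singleton (x : String) : PySem.Str.join "\n" [x] = x := by
  rw [← String.toList_inj]
  simp [PySem.Str.toList_join, PySem.Chars.join_singleton]

theorem pvBuild_concat (gs : List (String × List String)) (g : String × List String) :
    pvBuild (gs ++ [g]) = (pvBuild gs).insert g.1 (PySem.Str.join "\n" g.2) := by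
  simp [pvBuild]

theorem pvStep_sync (gs : List (String × List String)) (line : String)
    (h : ∀ g ∈ gs, g.2 ≠ []) :
    pvStepA (pvBuild gs, gs.getLast?.map (·.1)) line
      = (pvBuild (pvStepB gs line), (pvStepB gs line).getLast?.map (·.1))
    ∧ ∀ g ∈ pvStepB gs line, g.2 ≠ [] := by
  unfold pvStepA pvStepB
  by_cases hc : PySem.Str.isIn ":" line = true
  · rw [if_pos hc, if_pos hc]
    rcases hs : PySem.Str.splitMax? line ":" 1 with _ | parts
    · exact ⟨rfl, h⟩
    · match parts with
      | [] => exact ⟨rfl, h⟩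
      | [k] => exact ⟨rfl, h⟩
      | k :: v :: rest =>
        refine ⟨?_, ?_⟩
        · rw [pvBuild_concat, pvJoin_singleton]
          simp
        · intro g hg
          rcases List.mem_append.mp hg with hg | hg
          · exact h g hg
          · simp at hg; simp [hg]
  · rw [if_neg hc, if_neg hc]
    rcases List.eq_nil_or_concat gs with rfl | ⟨gs', g, rfl⟩
    · exact ⟨rfl, h⟩
    · simp only [List.concat_eq_append] at h ⊢
      have hlast : (gs' ++ [g]).getLast? = some g := List.getLast?_concat
      have hdrop : (gs' ++ [g]).dropLast = gs' := List.dropLast_concat ..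
      have hget : (pvBuild (gs' ++ [g])).get? g.1 = some (PySem.Str.join "\n" g.2) := by
        rw [pvBuild_concat]; exact PySem.Dict.get?_insert_self ..
      simp only [hlast, Option.map_some, hget, hdrop]
      constructor
      · have hne : g.2 ≠ [] := h g (by simp)
        rw [pvBuild_concat, pvBuild_concat, PySem.Dict.insert_insert_self,
          pvJoin_append_singleton g.2 (PySem.Str.strip line) hne]
        simp
      · intro g' hg'
        rcases List.mem_append.mp hg' with hg' | hg'
        · exact h g' (by simp [hg'])
        · simp at hg'; subst hg'; simp

theorem pvFold_sync (lines : List String) (gs : List (String × List String))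
    (h : ∀ g ∈ gs, g.2 ≠ []) :
    lines.foldl pvStepA (pvBuild gs, gs.getLast?.map (·.1))
      = ((pvBuild (lines.foldl pvStepB gs)),
         ((lines.foldl pvStepB gs).getLast?.map (·.1))) := by
  induction lines generalizing gs with
  | nil => simp
  | cons line rest ih =>
    obtain ⟨heq, hne⟩ := pvStep_sync gs line h
    simp only [List.foldl_cons, heq]
    exact ih _ hne

-- ===== VERDICT (by name: the statement is the Claim_ definition above) =====
theorem convert_pseudo_json_to_json_spec : Claim_equal_convert_pseudo_json_to_json := by
  intro s _
  simp only [Spec_convert_pseudo_json_to_json, convert_pseudo_json_to_json,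
    convert_pseudo_json_to_json_alt]
  have h := pvFold_sync ((PySem.Str.split? s "\n").getD []) [] (by simp)
  simp only [List.getLast?_nil, Option.map_none] at h
  rw [show (pvBuild [] : PySem.Dict String String) = PySem.Dict.empty from rfl] at h
  rw [h]
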